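-- pv_equiv track=rewrite | github.com/nint8835/advent-of-code | 2017/06/Day6.py | redistribute_memory_pt2
-- ===== SOURCE A (Python) =====
-- from typing import List
--
-- def redistribute_memory_pt2(memory: List[int]):
--     blocks = max(memory)
--     index = memory.index(blocks)
--     memory[index] = 0
--     while blocks != 0:
--         index += 1
--         if index >= len(memory):
--             index -= len(memory)
--         memory[index] += 1
--         blocks -= 1
--     return memory
-- ===== SOURCE B (Python) =====
-- from typing import List
--
-- def redistribute_memory_pt2(memory: List[int]):
--     n = len(memory)
--     blocks = max(memory)
--     i = memory.index(blocks)
--     q, r = divmod(blocks, n)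
--     out = []
--     for j in range(n):
--         base = 0 if j == i else memory[j]
--         off = (j - i - 1) % n
--         out.append(base + q + (1 if off < r else 0))
--     memory[:] = out
--     return memory
-- ===== Notes on version B (the rewrite author's own statement) =====
-- stated objective: alternative
-- what changed: replaces the one-block-at-a-time redistribution loop (max(memory) iterations) with a closed-form per-slot computation: each slot gets blocks//n plus one extra if its cyclic offset from the emptied slot is below blocks%n
import Mathlib
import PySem

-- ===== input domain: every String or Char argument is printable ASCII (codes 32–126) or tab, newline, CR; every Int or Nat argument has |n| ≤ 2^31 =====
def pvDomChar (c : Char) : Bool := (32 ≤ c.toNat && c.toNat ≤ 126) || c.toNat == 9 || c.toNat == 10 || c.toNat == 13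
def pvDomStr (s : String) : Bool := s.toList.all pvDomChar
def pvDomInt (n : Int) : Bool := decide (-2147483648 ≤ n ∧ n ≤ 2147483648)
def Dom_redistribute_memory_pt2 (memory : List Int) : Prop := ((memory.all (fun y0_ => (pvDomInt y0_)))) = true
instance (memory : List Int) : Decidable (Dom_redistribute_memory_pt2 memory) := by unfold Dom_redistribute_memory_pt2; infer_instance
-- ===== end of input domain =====

-- B replaces A's one-block-at-a-time redistribution loop by a closed-form per-slot
-- computation (blocks//n everywhere plus one extra on the first blocks%n slots after
-- the emptied one); both mutate the argument list in Python, the equivalence proved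
-- here is about the return value.


-- ===== PORT A =====
-- the while loop: fuel = blocks (nonnegative under Pre_, decremented to 0)
def redisLoopA : Nat → List Int → Int → List Int
  | 0, mem, _ => mem
  | Nat.succ blocks, mem, index =>
      let index := index + 1
      let index := if index ≥ (mem.length : Int) then index - (mem.length : Int) else index
      let mem := PySem.List.pySetD mem index (PySem.List.pyGetD mem index 0 + 1)
      redisLoopA blocks mem index

def redistribute_memory_pt2 (memory : List Int) : List Int :=
  match PySem.List.max? memory (fun x => x) with
  | none => []          -- unreachable under Pre_: max([]) raises ValueError
  | some blocks =>
    match PySem.List.index? memory blocks with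
    | none => []        -- unreachable: the maximum is a member
    | some index =>
      let memory := PySem.List.pySetD memory (index : Int) 0
      redisLoopA blocks.toNat memory (index : Int)

-- ===== PORT B =====
def redistribute_memory_pt2_alt (memory : List Int) : List Int :=
  match PySem.List.max? memory (fun x => x) with
  | none => []          -- unreachable under Pre_
  | some blocks =>
    match PySem.List.index? memory blocks with
    | none => []        -- unreachable
    | some i =>
      let n : Int := memory.length
      let q := PySem.Int.floordiv blocks n
      let r := PySem.Int.mod blocks n
      (PySem.List.pyRange 0 n 1).map (fun j =>
        let base := if j = (i : Int) then 0 else PySem.List.pyGetD memory j 0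
        let off := PySem.Int.mod (j - i - 1) n
        base + q + (if off < r then 1 else 0))

-- ===== PRECONDITION & SPEC =====
-- Pre_ excludes the empty list (A raises ValueError in max) and lists whose maximum is
-- negative (A's while loop never terminates there).
def Pre_redistribute_memory_pt2 (memory : List Int) : Prop :=
  memory ≠ [] ∧ ∃ x ∈ memory, 0 ≤ x
instance (memory : List Int) : Decidable (Pre_redistribute_memory_pt2 memory) := by
  unfold Pre_redistribute_memory_pt2; infer_instance

def pvWitness_redistribute_memory_pt2 : List Int := [0, 2, 7, 0]

def Spec_redistribute_memory_pt2 (memory : List Int) (out : List Int) : Prop := out = redistribute_memory_pt2_alt memory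
instance (memory : List Int) (out : List Int) : Decidable (Spec_redistribute_memory_pt2 memory out) := by unfold Spec_redistribute_memory_pt2; infer_instance

-- ===== CLAIM (what is proved, stated in full; the proofs are below) =====
def Claim_equal_redistribute_memory_pt2 : Prop := ∀ (memory : List Int), Dom_redistribute_memory_pt2 memory → Pre_redistribute_memory_pt2 memory → Spec_redistribute_memory_pt2 memory (redistribute_memory_pt2 memory)

-- ===== LEMMAS AND PROOFS =====

-- number of extra blocks slot j receives after k single-block steps starting after slot i
def cnt (k n i j : Nat) : Int :=
  ((k / n : Nat) : Int) + (if (j + n - 1 - i) % n < k % n then 1 else 0)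

theorem mod_small_cases (x n : Nat) (hn : 0 < n) (h : x < 2 * n) :
    x % n = if x < n then x else x - n := by
  split_ifs with h1
  · exact Nat.mod_eq_of_lt h1
  · rw [Nat.mod_eq_sub_mod (le_of_not_gt h1)]
    exact Nat.mod_eq_of_lt (by omega)

theorem cnt_succ (k n i j : Nat) (hn : 0 < n) (hi : i < n) (hj : j < n) :
    cnt (k + 1) n i j = cnt k n ((i + 1) % n) j + (if j = (i + 1) % n then 1 else 0) := by
  unfold cnt
  have hq := Nat.div_add_mod k n
  have hr : k % n < n := Nat.mod_lt _ hn
  have hi1 : (i + 1 < n ∧ (i + 1) % n = i + 1) ∨ (n ≤ i + 1 ∧ (i + 1) % n = i + 1 - n) := by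
    have := mod_small_cases (i + 1) n hn (by omega)
    split_ifs at this with hc
    · exact Or.inl ⟨hc, this⟩
    · exact Or.inr ⟨by omega, this⟩
  have hi2 : (i + 1) % n < n := Nat.mod_lt _ hn
  have hd : (j + n - 1 - i < n ∧ (j + n - 1 - i) % n = j + n - 1 - i) ∨
      (n ≤ j + n - 1 - i ∧ (j + n - 1 - i) % n = j + n - 1 - i - n) := by
    have := mod_small_cases (j + n - 1 - i) n hn (by omega)
    split_ifs at this with hc
    · exact Or.inl ⟨hc, this⟩
    · exact Or.inr ⟨by omega, this⟩
  have hd' : (j + n - 1 - (i + 1) % n < n ∧ (j + n - 1 - (i + 1) % n) % n = j + n - 1 - (i + 1) % n) ∨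
      (n ≤ j + n - 1 - (i + 1) % n ∧ (j + n - 1 - (i + 1) % n) % n = j + n - 1 - (i + 1) % n - n) := by
    have := mod_small_cases (j + n - 1 - (i + 1) % n) n hn (by omega)
    split_ifs at this with hc
    · exact Or.inl ⟨hc, this⟩
    · exact Or.inr ⟨by omega, this⟩
  have hb1 : (j + n - 1 - i) % n < n := Nat.mod_lt _ hn
  have hb2 : (j + n - 1 - (i + 1) % n) % n < n := Nat.mod_lt _ hn
  by_cases hcase : k % n + 1 < n
  · obtain ⟨h1, h2⟩ :=
      (Nat.div_mod_unique hn (a := k + 1) (b := n) (c := k % n + 1) (d := k / n)).mpr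
        ⟨by omega, by omega⟩
    rw [h1, h2]
    rcases hi1 with ⟨hc1, h⟩ | ⟨hc1, h⟩ <;> rcases hd with ⟨hc2, h'⟩ | ⟨hc2, h'⟩ <;> rcases hd' with ⟨hc3, h''⟩ | ⟨hc3, h''⟩ <;> split_ifs <;> omega
  · have e : n * (k / n + 1) = n * (k / n) + n := by ring
    obtain ⟨h1, h2⟩ :=
      (Nat.div_mod_unique hn (a := k + 1) (b := n) (c := 0) (d := k / n + 1)).mpr
        ⟨by omega, by omega⟩
    rw [h1, h2]
    rcases hi1 with ⟨hc1, h⟩ | ⟨hc1, h⟩ <;> rcases hd with ⟨hc2, h'⟩ | ⟨hc2, h'⟩ <;> rcases hd' with ⟨hc3, h''⟩ | ⟨hc3, h''⟩ <;> split_ifs <;> omega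

theorem range_map_getD (mem : List Int) :
    (List.range mem.length).map (fun j => mem.getD j 0) = mem := by
  apply List.ext_getElem
  · simp
  · intro a h1 h2
    simp [List.getD, List.getElem?_eq_getElem h2]

theorem getD_set (mem : List Int) (p a : Nat) (hp : p < mem.length) (v : Int) :
    (mem.set p v).getD a 0 = if a = p then v else mem.getD a 0 := by
  unfold List.getD
  rw [List.getElem?_set]
  split_ifs with hc1 hc2
  · simp
  · omega
  · omega
  · rfl

theorem redisLoopA_closed (k : Nat) : ∀ (mem : List Int) (i : Nat), i < mem.length →
    redisLoopA k mem (i : Int) =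
      (List.range mem.length).map (fun j => mem.getD j 0 + cnt k mem.length i j) := by
  induction k with
  | zero =>
    intro mem i hi
    have h0 : ∀ j, cnt 0 mem.length i j = 0 := by
      intro j; simp [cnt]
    simp only [redisLoopA, h0, add_zero]
    exact (range_map_getD mem).symm
  | succ k ih =>
    intro mem i hi
    have hn : 0 < mem.length := by omega
    have hmod := mod_small_cases (i + 1) mem.length hn (by omega)
    have hidx : (if (i : Int) + 1 ≥ (mem.length : Int) then (i : Int) + 1 - (mem.length : Int)
        else (i : Int) + 1) = (((i + 1) % mem.length : Nat) : Int) := by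
      split_ifs at hmod ⊢ with h1 h2 h2 <;> omega
    have hstep : redisLoopA (k + 1) mem (i : Int) =
        redisLoopA k (mem.set ((i + 1) % mem.length)
          (mem.getD ((i + 1) % mem.length) 0 + 1)) (((i + 1) % mem.length : Nat) : Int) := by
      simp only [redisLoopA]
      rw [hidx, PySem.List.pyGetD_natCast, PySem.List.pySetD_natCast]
    rw [hstep, ih _ _ (by simp [Nat.mod_lt _ hn])]
    apply List.ext_getElem
    · simp
    · intro a h1 h2
      have ha : a < mem.length := by simpa using h2
      have hlen : (mem.set ((i + 1) % mem.length)
          (mem.getD ((i + 1) % mem.length) 0 + 1)).length = mem.length := by simp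
      simp only [List.getElem_map, List.getElem_range, hlen]
      rw [cnt_succ k mem.length i a hn hi ha]
      rw [getD_set mem _ a (Nat.mod_lt _ hn) _]
      split_ifs with hc
      · subst hc; ring
      · ring
-- ===== VERDICT (by name: the statement is the Claim_ definition above) =====
theorem redistribute_memory_pt2_spec : Claim_equal_redistribute_memory_pt2 := by
  intro memory hdom hpre
  obtain ⟨hne, x, hxmem, hx0⟩ := hpre
  obtain ⟨m, hm⟩ : ∃ m, PySem.List.max? memory (fun x => x) = some m := by
    cases h : PySem.List.max? memory (fun x => x) with
    | none => exact absurd (((PySem.List.max?_eq_none_iff _ _).mp h)) hne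
    | some m => exact ⟨m, rfl⟩
  have hmmem : m ∈ memory := PySem.List.max?_mem hm
  have hm0 : 0 ≤ m := le_trans hx0 (PySem.List.max?_isMax hm x hxmem)
  obtain ⟨p, hp⟩ : ∃ p, PySem.List.index? memory m = some p :=
    Option.isSome_iff_exists.mp (((PySem.List.index?_isSome_iff _ _).mpr hmmem))
  obtain ⟨hplen, hpval, -⟩ := PySem.List.getElem_of_index?_eq_some hp
  have hn : 0 < memory.length := List.length_pos_iff.mpr hne
  unfold Spec_redistribute_memory_pt2 redistribute_memory_pt2 redistribute_memory_pt2_alt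
  simp only [hm, hp]
  rw [show PySem.List.pySetD memory (p : Int) 0 = memory.set p 0 from by simp]
  rw [redisLoopA_closed m.toNat (memory.set p 0) p (by simpa using hplen)]
  rw [PySem.List.pyRange_zero_natCast, List.map_map]
  apply List.ext_getElem
  · simp
  intro a h1 h2
  have ha : a < memory.length := by simpa using h1
  have hk : m = ((m.toNat : Nat) : Int) := (Int.toNat_of_nonneg hm0).symm
  have hoff : PySem.Int.mod ((a : Int) - (p : Int) - 1) (memory.length : Int) =
      (((a + memory.length - 1 - p) % memory.length : Nat) : Int) := by
    rw [PySem.Int.mod_eq_emod_of_pos (by exact_mod_cast hn)]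
    have h3 : ((a : Int) - (p : Int) - 1) % (memory.length : Int) =
        (((a + memory.length - 1 - p : Nat) : Int)) % (memory.length : Int) := by
      rw [show (((a + memory.length - 1 - p : Nat) : Int)) =
          ((a : Int) - (p : Int) - 1) + (memory.length : Int) * 1 from by
        push_cast; omega]
      rw [Int.add_mul_emod_self_left]
    rw [h3]
    exact (Int.natCast_mod _ _).symm
  simp only [List.getElem_map, List.getElem_range, Function.comp_apply, List.length_set]
  rw [getD_set memory p a hplen 0, cnt, hk, PySem.Int.floordiv_natCast, PySem.Int.mod_natCast,
    hoff, Int.toNat_natCast]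
  simp only [Nat.cast_inj, Nat.cast_lt, PySem.List.pyGetD_natCast]
  split_ifs <;> ring
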